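-- pv_equiv track=rewrite | github.com/tedsomething/pagerank | main.py | check_outbound
-- ===== SOURCE A (Python) =====
-- def check_outbound(matrix):
-- 	size = len(matrix)
--
-- 	for i in range(0, size):
-- 		make = 0
--
-- 		j = 0
-- 		while j < size:
-- 			if matrix[i][j] == 1:
-- 				break
--
-- 			if j == 1 and make == 0:
-- 				j = 0
-- 				make = 1
--
-- 			if make == 1:
-- 				matrix[i][j] = 1
--
-- 			j = j + 1
--
-- 	return matrix
-- ===== SOURCE B (Python) =====
-- def check_outbound(matrix):
--     size = len(matrix)
--     for row in matrix:
--         k = next((j for j in range(size) if row[j] == 1), size)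
--         if k >= 2:
--             row[0:k] = [1] * k
--     return matrix
-- ===== Notes on version B (the rewrite author's own statement) =====
-- stated objective: simpler
-- what changed: Replaces A's single stateful while-loop with a reset-to-zero pointer and a 'make' flag by a plain locate-then-fill: find the first 1 in the row, and if it sits at column 2 or later (or is absent) overwrite the prefix with 1s via a slice assignment.
import Mathlib
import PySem

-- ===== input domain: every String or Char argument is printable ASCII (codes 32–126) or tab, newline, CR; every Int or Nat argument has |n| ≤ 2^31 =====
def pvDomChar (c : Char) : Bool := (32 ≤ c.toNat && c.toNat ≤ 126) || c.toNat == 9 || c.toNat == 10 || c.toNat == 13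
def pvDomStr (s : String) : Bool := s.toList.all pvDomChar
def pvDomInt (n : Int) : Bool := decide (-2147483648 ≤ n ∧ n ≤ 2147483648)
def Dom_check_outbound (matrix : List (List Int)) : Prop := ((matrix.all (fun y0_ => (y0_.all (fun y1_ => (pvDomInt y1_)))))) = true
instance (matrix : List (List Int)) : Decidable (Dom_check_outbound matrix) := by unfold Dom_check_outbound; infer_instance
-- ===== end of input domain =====

-- B rewrites each row by locate-then-fill (find the first 1, slice-assign the prefix) instead
-- of A's reset-pointer while loop; both Pythons mutate the matrix in place and return it, and
-- the equivalence proved here is about the returned value.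

-- ===== PORT A =====
-- A's inner while loop: state (row, j, make); the fuel bounds the number of loop bodies
-- (at most size + 2 run, since j is reset to 0 at most once).
def loopA (size : Nat) (row : List Int) (j : Nat) (make : Nat) : Nat → List Int
  | 0 => row
  | fuel + 1 =>
    if j < size then
      if row.getD j 0 = 1 then row
      else
        let p := if j = 1 ∧ make = 0 then ((0 : Nat), (1 : Nat)) else (j, make)
        let row' := if p.2 = 1 then row.set p.1 1 else row
        loopA size row' (p.1 + 1) p.2 fuel
    else row

def check_outbound (matrix : List (List Int)) : List (List Int) :=
  let size := matrix.length
  matrix.map (fun row => loopA size row 0 0 (size + 2))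

-- ===== PORT B =====
-- `next((j for j in range(size) if row[j] == 1), size)` is `find?` over the range with
-- default `size`; `row[0:k] = [1]*k` is replicate-prefix ++ drop.
def check_outbound_alt (matrix : List (List Int)) : List (List Int) :=
  let size := matrix.length
  matrix.map (fun row =>
    let k : Nat := ((List.range size).find? (fun j => row.getD j 0 == (1 : Int))).getD size
    if 2 ≤ k then List.replicate k 1 ++ row.drop k else row)

-- ===== PRECONDITION & SPEC =====
-- Pre_ excludes exactly the ragged inputs on which Python A raises IndexError: a row shorter
-- than the matrix with no 1 among its first `size` entries makes A read past the row's end.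
def Pre_check_outbound (matrix : List (List Int)) : Prop :=
  ∀ row ∈ matrix, (1 : Int) ∈ row.take matrix.length ∨ matrix.length ≤ row.length

instance (matrix : List (List Int)) : Decidable (Pre_check_outbound matrix) := by
  unfold Pre_check_outbound; infer_instance

def pvWitness_check_outbound : List (List Int) := [[0, 0, 1], [1, 0, 0], [0, 0, 0]]

def Spec_check_outbound (matrix : List (List Int)) (out : List (List Int)) : Prop := out = check_outbound_alt matrix
instance (matrix : List (List Int)) (out : List (List Int)) : Decidable (Spec_check_outbound matrix out) := by unfold Spec_check_outbound; infer_instance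

-- ===== CLAIM (what is proved, stated in full; the proofs are below) =====
def Claim_equal_check_outbound : Prop := ∀ (matrix : List (List Int)), Dom_check_outbound matrix → Pre_check_outbound matrix → Spec_check_outbound matrix (check_outbound matrix)

-- ===== LEMMAS AND PROOFS =====

theorem getD_set_ne (r : List Int) (j m : Nat) (h : m ≠ j) :
    (r.set j 1).getD m 0 = r.getD m 0 := by
  simp [List.getD, List.getElem?_set_ne (Ne.symm h)]

theorem take_succ_set (r : List Int) (j : Nat) (h : j < r.length) :
    (r.set j 1).take (j + 1) = r.take j ++ [1] := by
  rw [List.set_eq_take_cons_drop _ h, List.take_append]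
  simp [Nat.min_eq_left (Nat.le_of_lt h), List.take_succ_cons]

-- Fill phase of A's loop: with make = 1 and 1 ≤ j ≤ k ≤ r.length (k the first 1 at or
-- after j, or size if none), the loop sets indices j..k-1 to 1 and stops.
theorem loopA_fill (size : Nat) (k : Nat) (hk : k ≤ size) :
    ∀ (fuel j : Nat) (r : List Int), 1 ≤ j → j ≤ k → k ≤ r.length →
    (∀ m, j ≤ m → m < k → r.getD m 0 ≠ 1) →
    (k < size → r.getD k 0 = 1) →
    k - j < fuel →
    loopA size r j 1 fuel = r.take j ++ List.replicate (k - j) 1 ++ r.drop k := by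
  intro fuel
  induction fuel with
  | zero => intro j r _ _ _ _ _ h; omega
  | succ fuel ih =>
    intro j r hj1 hjk hkr hne hk1 hfuel
    rcases Nat.lt_or_ge j k with hlt | hge
    · -- j < k : this step writes index j and recurses
      have hjsz : j < size := by omega
      have hget : ¬ r.getD j 0 = 1 := hne j le_rfl hlt
      have hjlen : j < r.length := by omega
      have hrec := ih (j + 1) (r.set j 1) (by omega) (by omega)
        (by simpa using hkr)
        (by
          intro m hm1 hm2
          rw [getD_set_ne _ _ _ (by omega)]
          exact hne m (by omega) hm2)
        (by
          intro h
          rw [getD_set_ne _ _ _ (by omega)]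
          exact hk1 h)
        (by omega)
      have hcond : ¬ (j = 1 ∧ (1 : Nat) = 0) := by simp
      simp only [loopA, if_pos hjsz, if_neg hget, if_neg hcond, if_true]
      rw [hrec, take_succ_set _ _ hjlen, List.drop_set_of_lt hlt]
      have hkj : k - j = (k - (j + 1)) + 1 := by omega
      rw [hkj]
      simp [List.replicate_succ, List.append_assoc]
    · -- j = k : the loop stops (break on the 1, or j = size)
      have hjk' : j = k := by omega
      subst hjk'
      rcases Nat.lt_or_ge j size with hsz | hsz
      · have h1 := hk1 hsz
        simp_all [loopA, List.take_append_drop]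
      · have hns : ¬ j < size := by omega
        simp [loopA, hns, List.take_append_drop]

-- Core of the per-row equivalence, for an abstract k characterised as the first 1 position
-- (or size if the first size entries hold no 1).
theorem row_core (size k : Nat) (row : List Int)
    (hk_le : k ≤ size)
    (hk_hit : k < size → row.getD k 0 = 1)
    (hk_min : ∀ m, m < k → row.getD m 0 ≠ 1)
    (hpre : (1 : Int) ∈ row.take size ∨ size ≤ row.length) :
    loopA size row 0 0 (size + 2) =
      if 2 ≤ k then List.replicate k 1 ++ row.drop k else row := by
  have hk_len : k ≤ row.length := by
    by_contra hlen
    rw [Nat.not_le] at hlen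
    have hget : row.getD k 0 = 0 := List.getD_eq_default _ _ (Nat.le_of_lt hlen)
    rcases Nat.lt_or_ge k size with hks | hks
    · have h1 := hk_hit hks
      rw [hget] at h1
      exact absurd h1 (by norm_num)
    · have hksz : k = size := by omega
      rcases hpre with hmem | hsz
      · rcases List.mem_iff_getElem.mp hmem with ⟨i, hi, hgi⟩
        have hilen : i < row.length := by
          have := hi; simp [List.length_take] at this; omega
        have hisz : i < size := by
          have := hi; simp [List.length_take] at this; omega
        have hgd : row.getD i 0 = 1 := by
          rw [List.getD_eq_getElem _ _ hilen]
          simpa [List.getElem_take] using hgi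
        exact hk_min i (by omega) hgd
      · omega
  rcases Nat.lt_or_ge k 2 with hk2 | hk2
  · -- k = 0 or 1 : both leave the row unchanged
    have hnot : ¬ 2 ≤ k := by omega
    rw [if_neg hnot]
    interval_cases k
    · -- k = 0 : row[0] is a 1 (or size = 0)
      rcases Nat.eq_zero_or_pos size with h0 | h0
      · have : ¬ 0 < size := by omega
        simp [loopA, this]
      · have h1 := hk_hit h0
        have hh : ¬ 2 ≤ size + 2 - 1 ∨ True := by simp
        simp_all [loopA]
    · -- k = 1 : row[0] is not 1; either size = 1 (loop just ends) or row[1] is a 1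
      have h0s : 0 < size := by omega
      have h0 : ¬ row.getD 0 0 = 1 := hk_min 0 (by omega)
      rcases Nat.lt_or_ge 1 size with h1s | h1s
      · have h1 := hk_hit h1s
        have h0' : ¬ row[0]?.getD 0 = 1 := by rwa [← List.getD_eq_getElem?_getD]
        have h1' : row[1]?.getD 0 = 1 := by rwa [← List.getD_eq_getElem?_getD]
        simp [loopA, h0s, h1s, h0', h1']
      · have hns : ¬ 1 < size := by omega
        simp [loopA, h0s, hns]
  · -- k ≥ 2 : A fills indices 0..k-1, B writes the replicate prefix
    rw [if_pos hk2]
    have h0s : 0 < size := by omega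
    have h1s : 1 < size := by omega
    have h0 : ¬ row.getD 0 0 = 1 := hk_min 0 (by omega)
    have h1 : ¬ row.getD 1 0 = 1 := hk_min 1 (by omega)
    have hlen1 : 0 < row.length := by omega
    -- two unfolding steps: j = 0 (no write), then j = 1 (reset to 0, write index 0)
    have h0' : ¬ row[0]?.getD 0 = 1 := by rwa [← List.getD_eq_getElem?_getD]
    have h1' : ¬ row[1]?.getD 0 = 1 := by rwa [← List.getD_eq_getElem?_getD]
    have step01 : loopA size row 0 0 (size + 2) = loopA size (row.set 0 1) 1 1 size := by
      simp [loopA, h0s, h1s, h0', h1']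
    rw [step01]
    have hfill := loopA_fill size k hk_le size 1 (row.set 0 1) (by omega) (by omega)
      (by simpa using hk_len)
      (by
        intro m hm1 hm2
        rw [getD_set_ne _ _ _ (by omega)]
        exact hk_min m hm2)
      (by
        intro h
        rw [getD_set_ne _ _ _ (by omega)]
        exact hk_hit h)
      (by omega)
    rw [hfill]
    have htake : (row.set 0 1).take 1 = [1] := by
      have := take_succ_set row 0 hlen1
      simpa using this
    have hdrop : (row.set 0 1).drop k = row.drop k := List.drop_set_of_lt (by omega)
    rw [htake, hdrop]
    have hkk : k = (k - 1) + 1 := by omega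
    rw [hkk]
    simp [List.replicate_succ]

-- Per-row equivalence: A's while loop equals B's locate-then-fill, for a row admitted by Pre_.
theorem row_eq (size : Nat) (row : List Int)
    (hpre : (1 : Int) ∈ row.take size ∨ size ≤ row.length) :
    loopA size row 0 0 (size + 2) =
      (let k : Nat := ((List.range size).find? (fun j => row.getD j 0 == (1 : Int))).getD size
       if 2 ≤ k then List.replicate k 1 ++ row.drop k else row) := by
  simp only
  rcases hfind : (List.range size).find? (fun j => row.getD j 0 == (1 : Int)) with _ | j
  · -- no 1 among the first size entries : k = size
    rw [Option.getD_none]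
    refine row_core size size row le_rfl (by omega) ?_ hpre
    intro m hm h1
    have := List.find?_eq_none.mp hfind m (List.mem_range.mpr hm)
    simp only [beq_iff_eq] at this
    exact this h1
  · -- first 1 at index j
    rw [Option.getD_some]
    rcases List.find?_eq_some_iff_getElem.mp hfind with ⟨hp, i, hi, hgi, hmin⟩
    have hisz : i < size := by simpa using hi
    have hji : j = i := by simpa using hgi.symm
    refine row_core size j row (by omega) (fun _ => by simpa using hp) ?_ hpre
    intro m hm h1
    have := hmin m (by omega)
    simp only [List.getElem_range, Bool.not_eq_eq_eq_not] at this
    exact absurd h1 (by simpa using this)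
theorem check_outbound_spec : Claim_equal_check_outbound := by
  intro matrix _ hpre
  unfold Spec_check_outbound check_outbound check_outbound_alt
  apply List.map_congr_left
  intro row hrow
  exact row_eq matrix.length row (hpre row hrow)
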